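-- pv_equiv track=rewrite | github.com/AvivZelinger/deepScan2 | py_scripts/gens/generate_dissector.py | split_object_fields
-- ===== SOURCE A (Python) =====
-- def split_object_fields(fields):
--     """
--     Splits keys like "obj.field" into object_fields[obj][field] = info,
--     and everything else into simple_fields.
--     """
--     simple_fields = {}
--     object_fields = {}
--     for fname, info in fields.items():
--         if "." in fname:
--             obj, subf = fname.split(".", 1)
--             object_fields.setdefault(obj, {})[subf] = info
--         else:
--             simple_fields[fname] = info
--     return simple_fields, object_fields
-- ===== SOURCE B (Python) =====
-- def split_object_fields(fields):
--     """
--     Splits keys like "obj.field" into object_fields[obj][field] = info,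
--     and everything else into simple_fields.
--     """
--     simple_fields = {name: info for name, info in fields.items() if "." not in name}
--     prefixes = list(dict.fromkeys(name.split(".", 1)[0] for name in fields if "." in name))
--     object_fields = {
--         prefix: {name.split(".", 1)[1]: info
--                  for name, info in fields.items()
--                  if "." in name and name.split(".", 1)[0] == prefix}
--         for prefix in prefixes
--     }
--     return simple_fields, object_fields
-- ===== Notes on version B (the rewrite author's own statement) =====
-- stated objective: alternative
-- what changed: Replaces A's single stateful pass with setdefault-mutation by declarative comprehensions: a filter comprehension for simple fields, an ordered-dedup list of object prefixes, and a nested dict-comprehension that rescans the fields per prefix.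
import Mathlib
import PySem

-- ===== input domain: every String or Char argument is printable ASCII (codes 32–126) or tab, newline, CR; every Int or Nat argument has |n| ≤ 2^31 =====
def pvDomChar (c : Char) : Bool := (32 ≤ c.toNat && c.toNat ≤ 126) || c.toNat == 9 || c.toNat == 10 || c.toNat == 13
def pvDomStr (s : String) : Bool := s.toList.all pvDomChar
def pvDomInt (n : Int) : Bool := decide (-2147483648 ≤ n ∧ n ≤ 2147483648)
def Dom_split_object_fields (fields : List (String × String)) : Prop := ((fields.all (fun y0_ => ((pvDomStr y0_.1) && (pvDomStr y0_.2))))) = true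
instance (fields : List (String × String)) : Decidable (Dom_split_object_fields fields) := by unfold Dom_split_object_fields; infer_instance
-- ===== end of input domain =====

-- B rebuilds the two dicts by comprehensions over a dedup'd prefix list instead of A's single
-- stateful setdefault pass (objective: alternative decomposition, same results in the same order).

-- shared string helpers: '"." in s' and the two halves of s.split(".", 1)
def pvDotted (s : String) : Bool := PySem.Str.isIn "." s
def pvParts (s : String) : List String := (PySem.Str.splitMax? s "." 1).getD []
def pvObj (s : String) : String := (pvParts s).getD 0 ""
def pvSub (s : String) : String := (pvParts s).getD 1 ""

-- ===== PORT A =====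
def split_object_fields (fields : List (String × String)) : (List (String × String)) × (List (String × List (String × String))) :=
  let r := fields.foldl
    (fun (st : PySem.Dict String String × PySem.Dict String (PySem.Dict String String)) p =>
      if pvDotted p.1 then
        -- object_fields.setdefault(obj, {})[subf] = info
        (st.1, st.2.modify (pvObj p.1) PySem.Dict.empty (fun d => d.insert (pvSub p.1) p.2))
      else
        (st.1.insert p.1 p.2, st.2))
    (PySem.Dict.empty, PySem.Dict.empty)
  (r.1.items, r.2.items.map (fun q => (q.1, q.2.items)))

-- ===== PORT B =====
-- a dict comprehension over a list of (key, value) pairs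
def pvDictOf (ps : List (String × String)) : PySem.Dict String String :=
  ps.foldl (fun d p => d.insert p.1 p.2) PySem.Dict.empty

def split_object_fields_alt (fields : List (String × String)) : (List (String × String)) × (List (String × List (String × String))) :=
  let simple := pvDictOf (fields.filter (fun p => !pvDotted p.1))
  let prefixes := PySem.List.dedup ((fields.filter (fun p => pvDotted p.1)).map (fun p => pvObj p.1))
  let objects := prefixes.foldl
    (fun (d : PySem.Dict String (PySem.Dict String String)) pr =>
      d.insert pr (pvDictOf ((fields.filter (fun p => pvDotted p.1 && pvObj p.1 == pr)).map (fun p => (pvSub p.1, p.2)))))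
    PySem.Dict.empty
  (simple.items, objects.items.map (fun q => (q.1, q.2.items)))

-- ===== PRECONDITION & SPEC =====
def Spec_split_object_fields (fields : List (String × String)) (out : (List (String × String)) × (List (String × List (String × String)))) : Prop := out = split_object_fields_alt fields
instance (fields : List (String × String)) (out : (List (String × String)) × (List (String × List (String × String)))) : Decidable (Spec_split_object_fields fields out) := by unfold Spec_split_object_fields; infer_instance

-- ===== CLAIM (what is proved, stated in full; the proofs are below) =====
def Claim_equal_split_object_fields : Prop := ∀ (fields : List (String × String)), Dom_split_object_fields fields → Spec_split_object_fields fields (split_object_fields fields)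

-- ===== LEMMAS AND PROOFS =====

theorem pv_fold_split (l : List (String × String))
    (s : PySem.Dict String String) (o : PySem.Dict String (PySem.Dict String String)) :
    l.foldl
      (fun (st : PySem.Dict String String × PySem.Dict String (PySem.Dict String String)) p =>
        if pvDotted p.1 then
          (st.1, st.2.modify (pvObj p.1) PySem.Dict.empty (fun d => d.insert (pvSub p.1) p.2))
        else
          (st.1.insert p.1 p.2, st.2)) (s, o)
    = ((l.filter (fun p => !pvDotted p.1)).foldl (fun d p => d.insert p.1 p.2) s,
       (l.filter (fun p => pvDotted p.1)).foldl
         (fun d p => d.modify (pvObj p.1) PySem.Dict.empty (fun t => t.insert (pvSub p.1) p.2)) o) := by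
  induction l generalizing s o with
  | nil => simp
  | cons p tl ih =>
    by_cases h : pvDotted p.1 = true <;> simp [List.foldl_cons, h, ih]

theorem pv_getD_fold_modify (l : List (String × String))
    (o : PySem.Dict String (PySem.Dict String String)) (pr : String) :
    (l.foldl (fun d p => d.modify (pvObj p.1) PySem.Dict.empty (fun t => t.insert (pvSub p.1) p.2)) o).getD pr PySem.Dict.empty
    = (l.filter (fun p => pvObj p.1 == pr)).foldl (fun d p => d.insert (pvSub p.1) p.2)
        (o.getD pr PySem.Dict.empty) := by
  induction l generalizing o with
  | nil => simp
  | cons p tl ih =>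
    by_cases h : pvObj p.1 = pr
    · simp [List.foldl_cons, h, ih]
    · simp only [List.foldl_cons]
      rw [ih, PySem.Dict.getD_modify, if_neg (Ne.symm h)]
      simp [h]

theorem pv_items_eq_map_keys {ν : Type} (d : PySem.Dict String ν) (d0 : ν)
    (h : d.keys.Nodup) : d.items = d.keys.map (fun k => (k, d.getD k d0)) := by
  have : d.keys.map (fun k => (k, d.getD k d0)) = d.items.map (fun p => (p.1, d.getD p.1 d0)) := by
    simp [PySem.Dict.keys, List.map_map, Function.comp]
  rw [this]
  have : d.items.map (fun p => (p.1, d.getD p.1 d0)) = d.items.map id := by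
    apply List.map_congr_left
    intro p hp
    have := PySem.Dict.get?_of_mem_items (d := d) (k := p.1) (v := p.2) (by simpa using hp) h
    simp [PySem.Dict.getD_eq_get?_getD, this]
  simp [this]

-- ===== VERDICT (by name: the statement is the Claim_ definition above) =====
theorem split_object_fields_spec : Claim_equal_split_object_fields := by
  intro fields _
  unfold Spec_split_object_fields split_object_fields split_object_fields_alt
  rw [pv_fold_split]
  set L := fields.filter (fun p => pvDotted p.1) with hL
  set O := L.foldl (fun d p => d.modify (pvObj p.1) PySem.Dict.empty (fun t => t.insert (pvSub p.1) p.2)) PySem.Dict.empty with hO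
  -- keys of the A-side object dict are the dedup'd prefixes
  have hkeys : O.keys = PySem.List.dedup (L.map (fun p => pvObj p.1)) := by
    rw [hO, PySem.Dict.keys_foldl_modify_key]
    simp [PySem.Set.update_nil_left]
  have hnod : O.keys.Nodup := by
    rw [hkeys]; exact PySem.List.nodup_dedup _
  -- A-side object items
  have hOitems : O.items = (PySem.List.dedup (L.map (fun p => pvObj p.1))).map
      (fun pr => (pr, (L.filter (fun p => pvObj p.1 == pr)).foldl
        (fun d p => d.insert (pvSub p.1) p.2) PySem.Dict.empty)) := by
    rw [pv_items_eq_map_keys O PySem.Dict.empty hnod, hkeys]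
    apply List.map_congr_left
    intro pr _
    rw [hO, pv_getD_fold_modify]
    simp
  -- B-side object items via the fresh-insert lemma
  have hBitems : ((PySem.List.dedup (L.map (fun p => pvObj p.1))).foldl
      (fun (d : PySem.Dict String (PySem.Dict String String)) pr =>
        d.insert pr (pvDictOf ((fields.filter (fun p => pvDotted p.1 && pvObj p.1 == pr)).map (fun p => (pvSub p.1, p.2)))))
      PySem.Dict.empty).items
      = (PySem.List.dedup (L.map (fun p => pvObj p.1))).map
          (fun pr => (pr, pvDictOf ((fields.filter (fun p => pvDotted p.1 && pvObj p.1 == pr)).map (fun p => (pvSub p.1, p.2))))) := by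
    rw [PySem.Dict.items_foldl_insert_fresh]
    · simp [PySem.Dict.empty]
    · intro a _; simp
    · simpa using PySem.List.nodup_dedup (L.map (fun p => pvObj p.1))
  refine Prod.ext rfl ?_
  simp only [hOitems, hBitems, List.map_map]
  apply List.map_congr_left
  intro pr _
  simp only [Function.comp]
  congr 1
  -- inner dicts coincide
  have hfilter : fields.filter (fun p => pvDotted p.1 && pvObj p.1 == pr)
      = L.filter (fun p => pvObj p.1 == pr) := by
    rw [hL, List.filter_filter]
    exact List.filter_congr (fun a _ => by rw [Bool.and_comm])
  rw [hfilter]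
  unfold pvDictOf
  rw [List.foldl_map]
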